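-- pv_equiv track=rewrite | github.com/owen970517/Programmers_Algo | Level_1/일정간격.py | solution
-- ===== SOURCE A (Python) =====
-- def solution(x, n):
--     answer = []
--     ran =[]
--     if x <0 :
--         ran = range(x,n*x-1,x)
--     elif x ==0:
--         for i in range(x,n) :
--             ran.append(0)
--     else:
--         ran = range(x,n*x+1,x)
--     for i in ran:
--             answer.append(i)
--
--     return answer
-- ===== SOURCE B (Python) =====
-- def solution(x, n):
--     return [x * i for i in range(1, n + 1)]
-- ===== Notes on version B (the rewrite author's own statement) =====
-- stated objective: simpler
-- what changed: Replaces A's three-way sign branch and additive-step range construction (plus an element-copy loop) with a single direct multiplication comprehension x*i for i in 1..n.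
import Mathlib
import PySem

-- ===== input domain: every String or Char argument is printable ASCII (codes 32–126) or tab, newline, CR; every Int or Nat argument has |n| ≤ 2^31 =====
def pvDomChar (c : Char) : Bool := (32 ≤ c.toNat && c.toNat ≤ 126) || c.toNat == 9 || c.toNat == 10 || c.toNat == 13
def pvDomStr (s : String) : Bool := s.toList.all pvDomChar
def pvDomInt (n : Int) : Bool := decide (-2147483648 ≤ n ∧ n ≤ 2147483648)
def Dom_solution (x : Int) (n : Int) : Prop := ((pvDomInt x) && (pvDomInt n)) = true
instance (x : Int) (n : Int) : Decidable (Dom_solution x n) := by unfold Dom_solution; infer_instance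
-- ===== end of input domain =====

-- B replaces A's three-way sign branch and stepped ranges by one direct multiplication comprehension (simpler).

-- ===== PORT A =====
def solution (x : Int) (n : Int) : List Int :=
  let ran : List Int :=
    if x < 0 then PySem.List.pyRange x (n * x - 1) x
    else if x = 0 then (PySem.List.pyRange x n 1).foldl (fun a _ => a ++ [(0 : Int)]) []
    else PySem.List.pyRange x (n * x + 1) x
  ran.foldl (fun a i => a ++ [i]) []

-- ===== PORT B =====
def solution_alt (x : Int) (n : Int) : List Int :=
  (PySem.List.pyRange 1 (n + 1) 1).map (fun i => x * i)

-- ===== PRECONDITION & SPEC =====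
def Spec_solution (x : Int) (n : Int) (out : List Int) : Prop := out = solution_alt x n
instance (x : Int) (n : Int) (out : List Int) : Decidable (Spec_solution x n out) := by unfold Spec_solution; infer_instance

-- ===== CLAIM (what is proved, stated in full; the proofs are below) =====
def Claim_equal_solution : Prop := ∀ (x : Int) (n : Int), Dom_solution x n → Spec_solution x n (solution x n)

-- ===== LEMMAS AND PROOFS =====

theorem foldl_push (l : List Int) (acc : List Int) :
    l.foldl (fun a i => a ++ [i]) acc = acc ++ l := by
  induction l generalizing acc with
  | nil => simp
  | cons h t ih => simp [List.foldl, ih]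

theorem foldl_push_const (l : List Int) (acc : List Int) :
    l.foldl (fun a _ => a ++ [(0 : Int)]) acc = acc ++ List.replicate l.length 0 := by
  induction l generalizing acc with
  | nil => simp
  | cons h t ih => simp [List.foldl, ih, List.replicate_succ]

theorem alt_eq (x : Int) (n : Int) :
    solution_alt x n = (List.range n.toNat).map (fun k : Nat => x * (1 + (k : Int))) := by
  unfold solution_alt
  rw [PySem.List.pyRange_one, List.map_map]
  have h : (n + 1 - 1).toNat = n.toNat := by omega
  rw [h]
  rfl

theorem solution_spec' (x n : Int) : solution x n = solution_alt x n := by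
  unfold solution
  rw [alt_eq]
  by_cases hx : x < 0
  · have hxne : -x ≠ 0 := by omega
    simp only [if_pos hx, foldl_push, List.nil_append]
    rw [PySem.List.pyRange_of_neg _ _ hx]
    have hnum : x - (n * x - 1) + -x - 1 = n * -x := by ring
    rw [hnum, Int.mul_ediv_cancel _ hxne]
    by_cases hn : 1 ≤ n
    · have : n * x - 1 < x := by nlinarith
      rw [if_pos this]
      apply List.map_congr_left
      intro k _
      ring
    · have h1 : 0 ≤ n * x := by nlinarith
      have : ¬ (n * x - 1 < x) := by omega
      rw [if_neg this]
      have : n.toNat = 0 := by omega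
      simp [this]
  · by_cases hx0 : x = 0
    · simp only [if_neg hx, if_pos hx0, foldl_push, foldl_push_const, List.nil_append]
      subst hx0
      rw [PySem.List.length_pyRange_one]
      simp
    · have hxpos : 0 < x := by omega
      simp only [if_neg hx, if_neg hx0, foldl_push, List.nil_append]
      rw [PySem.List.pyRange_of_pos _ _ hxpos]
      have hnum : n * x + 1 - x + x - 1 = n * x := by ring
      rw [hnum, Int.mul_ediv_cancel _ (by omega : x ≠ 0)]
      by_cases hn : 1 ≤ n
      · have : x < n * x + 1 := by nlinarith
        rw [if_pos this]
        apply List.map_congr_left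
        intro k _
        push_cast
        ring
      · have h1 : n * x ≤ 0 := by nlinarith
        have : ¬ (x < n * x + 1) := by omega
        rw [if_neg this]
        have : n.toNat = 0 := by omega
        simp [this]

-- ===== VERDICT (by name: the statement is the Claim_ definition above) =====
theorem solution_spec : Claim_equal_solution := by
  intro x n _
  exact solution_spec' x n
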